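-- pv_equiv track=rewrite | github.com/HelalChow/Pyhton-Basics | Homework/hw7/hc2324_hw7_q4.py | create_prefix_lists
-- ===== SOURCE A (Python) =====
-- def create_prefix_lists(lst):
--     prefix_lists=[[]]
--     for i in range(1, len(lst)+1):
--         part_list = []
--         for j in range(i):
--             part_list.append(lst[j])
--         prefix_lists.append(part_list)
--     return prefix_lists
-- ===== SOURCE B (Python) =====
-- def create_prefix_lists(lst):
--     # Single pass maintaining the running prefix; copies it once per element.
--     prefix_lists = [[]]
--     cur = []
--     for x in lst:
--         cur.append(x)
--         prefix_lists.append(cur[:])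
--     return prefix_lists
-- ===== Notes on version B (the rewrite author's own statement) =====
-- stated objective: simpler
-- what changed: Replaces the nested loops that rebuild every prefix element-by-element from scratch with a single pass that maintains the running prefix and appends one copy of it per element.
import Mathlib
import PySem

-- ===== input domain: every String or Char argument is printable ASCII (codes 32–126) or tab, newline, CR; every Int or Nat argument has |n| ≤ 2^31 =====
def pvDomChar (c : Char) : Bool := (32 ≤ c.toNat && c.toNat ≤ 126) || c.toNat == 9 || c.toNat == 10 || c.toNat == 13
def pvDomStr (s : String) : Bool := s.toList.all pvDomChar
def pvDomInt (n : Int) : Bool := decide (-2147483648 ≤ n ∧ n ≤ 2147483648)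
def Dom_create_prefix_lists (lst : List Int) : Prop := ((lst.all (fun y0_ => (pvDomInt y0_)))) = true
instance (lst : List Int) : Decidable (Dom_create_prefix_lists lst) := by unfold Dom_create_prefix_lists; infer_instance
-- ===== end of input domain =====

-- B keeps the running prefix as loop state (one pass, one copy per element) instead of
-- rebuilding each prefix with an inner loop; return values proved identical.

-- ===== PORT A =====
-- inner loop 'for j in range(i): part_list.append(lst[j])'; lst[j] is always in range here,
-- so pyGetD with default 0 is exact.
def create_prefix_lists (lst : List Int) : List (List Int) :=
  (PySem.List.pyRange 1 (PySem.List.len lst + 1) 1).foldl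
    (fun prefix_lists i =>
      let part_list := (PySem.List.pyRange 0 i 1).foldl
        (fun part_list j => part_list ++ [PySem.List.pyGetD lst j 0]) []
      prefix_lists ++ [part_list])
    [[]]

-- ===== PORT B =====
def create_prefix_lists_alt (lst : List Int) : List (List Int) :=
  (lst.foldl
    (fun (st : List (List Int) × List Int) x =>
      let cur := st.2 ++ [x]
      (st.1 ++ [cur], cur))
    ([[]], [])).1

-- ===== PRECONDITION & SPEC =====
def Spec_create_prefix_lists (lst : List Int) (out : List (List Int)) : Prop := out = create_prefix_lists_alt lst
instance (lst : List Int) (out : List (List Int)) : Decidable (Spec_create_prefix_lists lst out) := by unfold Spec_create_prefix_lists; infer_instance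

-- ===== CLAIM (what is proved, stated in full; the proofs are below) =====
def Claim_equal_create_prefix_lists : Prop := ∀ (lst : List Int), Dom_create_prefix_lists lst → Spec_create_prefix_lists lst (create_prefix_lists lst)

-- ===== LEMMAS AND PROOFS =====

-- inner loop of A: range(i) read back out of lst is lst.take i (for i ≤ len lst)
theorem pv_inner_eq_take (lst : List Int) (n : Nat) (h : n ≤ lst.length) :
    (PySem.List.pyRange 0 (n : Int) 1).map (fun j => PySem.List.pyGetD lst j 0) = lst.take n := by
  rw [PySem.List.pyRange_one]
  simp only [zero_add, Int.sub_zero, Int.toNat_natCast, List.map_map, Function.comp_def,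
    PySem.List.pyGetD_natCast]
  induction n generalizing lst with
  | zero => simp
  | succ m ih =>
    cases lst with
    | nil => simp at h
    | cons a as =>
      rw [List.range_succ_eq_map]
      simp only [List.map_cons, List.map_map, Function.comp_def, List.getD_cons_zero,
        List.getD_cons_succ, List.take_succ_cons]
      exact congrArg (a :: ·) (ih as (by simpa using h))

theorem pv_a_closed (lst : List Int) :
    create_prefix_lists lst
      = [[]] ++ (List.range lst.length).map (fun k => lst.take (k + 1)) := by
  unfold create_prefix_lists
  rw [PySem.List.foldl_append_singleton_eq_map, PySem.List.pyRange_one]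
  simp only [PySem.List.len_eq]
  congr 1
  rw [show ((lst.length : Int) + 1 - 1).toNat = lst.length by omega, List.map_map]
  refine List.map_congr_left (fun k hk => ?_)
  have hk' : k < lst.length := List.mem_range.mp hk
  have : (1 : Int) + k = ((k + 1 : Nat) : Int) := by push_cast; ring
  rw [Function.comp, this, PySem.List.foldl_append_singleton_eq_map,
    pv_inner_eq_take lst (k + 1) (by omega), List.nil_append]

theorem pv_b_inv (lst : List Int) (acc : List (List Int)) (cur : List Int) :
    (lst.foldl
      (fun (st : List (List Int) × List Int) x =>
        let cur := st.2 ++ [x]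
        (st.1 ++ [cur], cur))
      (acc, cur)).1
      = acc ++ (List.range lst.length).map (fun k => cur ++ lst.take (k + 1)) := by
  induction lst generalizing acc cur with
  | nil => simp
  | cons x xs ih =>
    simp only [List.foldl_cons]
    rw [ih]
    rw [List.length_cons, List.range_succ_eq_map]
    simp [List.map_map, Function.comp, List.take_succ_cons, List.append_assoc]

theorem pv_b_closed (lst : List Int) :
    create_prefix_lists_alt lst
      = [[]] ++ (List.range lst.length).map (fun k => lst.take (k + 1)) := by
  unfold create_prefix_lists_alt
  rw [pv_b_inv]
  simp

-- ===== VERDICT (by name: the statement is the Claim_ definition above) =====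
theorem create_prefix_lists_spec : Claim_equal_create_prefix_lists := by
  intro lst _
  unfold Spec_create_prefix_lists
  rw [pv_a_closed, pv_b_closed]
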